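-- pv_equiv track=rewrite | github.com/dev-yihyun/Algorithm | programmers/Lv0_120869.py | solution
-- ===== SOURCE A (Python) =====
-- def solution(spell, dic):
--     line =[0 for i in range(len(spell))]
--
--     for i in range(len(dic)):
--         l = list(dic[i])
--         for j in range(len(spell)):
--             if spell[j] in l:
--                 if line[j] ==0:
--                     line[j]=1
--                 else:
--                     continue
--         if line.count(0) >= 1:
--             line = [0 for i in range(len(spell))]
--         else:
--             return 1
--     return 2
-- ===== SOURCE B (Python) =====
-- def solution(spell, dic):
--     # Inverted approach: start from all word indices, and for each distinct
--     # spell token keep only the words that contain it as a character.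
--     candidates = set(range(len(dic)))
--     for c in set(spell):
--         candidates = {i for i in candidates if c in set(dic[i])}
--     return 1 if candidates else 2
-- ===== Notes on version B (the rewrite author's own statement) =====
-- stated objective: alternative
-- what changed: Replaces the per-word mark-array scan (a 0/1 line rebuilt and counted for every dictionary word, with repeated list-membership tests) by an inverted character-major pass: start from the set of all word indices and intersect away, per distinct spell character, the words lacking it (hash-set membership per word).
import Mathlib
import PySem

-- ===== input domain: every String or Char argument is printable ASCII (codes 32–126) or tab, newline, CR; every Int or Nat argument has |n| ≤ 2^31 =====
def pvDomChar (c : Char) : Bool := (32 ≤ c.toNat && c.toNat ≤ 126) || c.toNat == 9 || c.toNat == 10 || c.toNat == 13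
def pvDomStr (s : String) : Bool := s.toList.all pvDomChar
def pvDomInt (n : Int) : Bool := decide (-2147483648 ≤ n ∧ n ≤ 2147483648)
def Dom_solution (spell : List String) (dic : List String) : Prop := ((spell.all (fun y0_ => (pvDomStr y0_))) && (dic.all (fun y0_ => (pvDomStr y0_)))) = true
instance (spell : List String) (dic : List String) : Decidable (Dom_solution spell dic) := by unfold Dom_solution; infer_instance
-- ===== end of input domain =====

-- B inverts the traversal: character-major filtering of candidate word indices with hash-set
-- membership, instead of A's per-word 0/1 mark array rebuilt and counted for every word.

-- ===== PORT A =====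
-- list(w): the word as a list of one-character strings
def pvChars (w : String) : List String := w.toList.map (fun c => String.ofList [c])

-- the outer 'for i in range(len(dic))' loop of A, carrying the mark list 'line'
def solGo (spell : List String) (line : List Int) : List String → Int
  | [] => 2
  | w :: rest =>
      let l := pvChars w
      let line' := (List.range spell.length).foldl
        (fun ln j =>
          if List.getD spell j "" ∈ l then
            (if List.getD ln j 0 = 0 then ln.set j 1 else ln)
          else ln) line
      if 1 ≤ line'.count 0 then solGo spell (List.replicate spell.length 0) rest
      else 1

def solution (spell : List String) (dic : List String) : Int :=
  solGo spell (List.replicate spell.length 0) dic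

-- ===== PORT B =====
-- candidates = set(range(len(dic))); for c in set(spell): keep only words containing c
def solution_alt (spell : List String) (dic : List String) : Int :=
  let cands := (PySem.Set.ofList spell).foldl
    (fun cs c => cs.filter (fun i => decide (c ∈ PySem.Set.ofList (pvChars (List.getD dic i "")))))
    (List.range dic.length)
  if cands.isEmpty then 2 else 1

-- ===== PRECONDITION & SPEC =====
def Spec_solution (spell : List String) (dic : List String) (out : Int) : Prop := out = solution_alt spell dic
instance (spell : List String) (dic : List String) (out : Int) : Decidable (Spec_solution spell dic out) := by unfold Spec_solution; infer_instance

-- ===== CLAIM (what is proved, stated in full; the proofs are below) =====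
def Claim_equal_solution : Prop := ∀ (spell : List String) (dic : List String), Dom_solution spell dic → Spec_solution spell dic (solution spell dic)

-- ===== LEMMAS AND PROOFS =====

-- closed form of A's inner marking loop starting from the all-zero line
lemma fold_closed (spell : List String) (l : List String) (n : Nat) (hn : n ≤ spell.length) :
    (List.range n).foldl
      (fun ln j =>
        if List.getD spell j "" ∈ l then
          (if List.getD ln j 0 = 0 then ln.set j 1 else ln)
        else ln) (List.replicate spell.length 0)
    = (spell.take n).map (fun s => if s ∈ l then (1 : Int) else 0)
        ++ List.replicate (spell.length - n) 0 := by
  induction n with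
  | zero => simp
  | succ n ih =>
      have hn' : n < spell.length := hn
      rw [List.range_succ, List.foldl_append, ih (Nat.le_of_lt hn')]
      simp only [List.foldl_cons, List.foldl_nil]
      have hlenX : ((spell.take n).map (fun s => if s ∈ l then (1 : Int) else 0)).length = n := by
        simp [Nat.le_of_lt hn']
      have hrep : spell.length - n = (spell.length - (n+1)) + 1 := by omega
      have hget0 : List.getD
          ((spell.take n).map (fun s => if s ∈ l then (1 : Int) else 0)
            ++ List.replicate (spell.length - n) 0) n 0 = 0 := by
        rw [List.getD_eq_getElem?_getD, List.getElem?_append_right hlenX.le]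
        rw [hlenX]
        simp [hrep]
      rw [List.getD_eq_getElem spell "" hn', hget0]
      have htake : (spell.take (n+1)).map (fun s => if s ∈ l then (1 : Int) else 0)
          = (spell.take n).map (fun s => if s ∈ l then (1 : Int) else 0)
            ++ [if spell[n] ∈ l then (1 : Int) else 0] := by
        rw [List.map_take, List.map_take, List.take_add_one, List.getElem?_map,
          List.getElem?_eq_getElem hn']
        simp
      by_cases hmem : spell[n] ∈ l
      · rw [if_pos hmem, if_pos rfl]
        rw [hrep, List.replicate_succ, htake, if_pos hmem]
        rw [List.set_append]
        simp [Nat.min_eq_left (Nat.le_of_lt hn')]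
      · rw [if_neg hmem, htake, if_neg hmem]
        rw [hrep, List.replicate_succ]
        simp

lemma solGo_eq (spell : List String) (ws : List String) :
    solGo spell (List.replicate spell.length 0) ws
    = if ∃ w ∈ ws, ∀ s ∈ spell, s ∈ pvChars w then 1 else 2 := by
  induction ws with
  | nil => simp [solGo]
  | cons w rest ih =>
      simp only [solGo]
      rw [fold_closed spell (pvChars w) spell.length le_rfl]
      simp only [List.take_length, Nat.sub_self, List.replicate_zero, List.append_nil]
      have hcount : 1 ≤ ((spell.map (fun s => if s ∈ pvChars w then (1 : Int) else 0)).count 0)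
          ↔ ∃ s ∈ spell, s ∉ pvChars w := by
        rw [Nat.one_le_iff_ne_zero, Ne, List.count_eq_zero, not_not, List.mem_map]
        constructor
        · rintro ⟨s, hs, hgs⟩
          refine ⟨s, hs, ?_⟩
          by_contra hmem
          rw [if_pos hmem] at hgs
          exact one_ne_zero hgs
        · rintro ⟨s, hs, hmem⟩
          exact ⟨s, hs, by rw [if_neg hmem]⟩
      by_cases hw : ∀ s ∈ spell, s ∈ pvChars w
      · rw [if_neg (by rw [hcount]; push Not; exact hw)]
        rw [if_pos ⟨w, List.mem_cons_self, hw⟩]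
      · have hex : ∃ s ∈ spell, s ∉ pvChars w := by push Not at hw; exact hw
        rw [if_pos (hcount.mpr hex), ih]
        have hiff : (∃ x ∈ w :: rest, ∀ s ∈ spell, s ∈ pvChars x)
            ↔ ∃ x ∈ rest, ∀ s ∈ spell, s ∈ pvChars x := by
          constructor
          · rintro ⟨x, hx, hall⟩
            rcases List.mem_cons.mp hx with rfl | hx'
            · exact absurd hall hw
            · exact ⟨x, hx', hall⟩
          · rintro ⟨x, hx, hall⟩
            exact ⟨x, List.mem_cons_of_mem _ hx, hall⟩
        simp only [hiff]

lemma foldl_filter (p : String → Nat → Bool) (cs : List String) (init : List Nat) :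
    cs.foldl (fun acc c => acc.filter (p c)) init
    = init.filter (fun i => cs.all (fun c => p c i)) := by
  induction cs generalizing init with
  | nil => simp
  | cons c cs ih =>
      rw [List.foldl_cons, ih, List.filter_filter]
      congr 1
      funext i
      simp [Bool.and_comm]

lemma alt_eq (spell : List String) (dic : List String) :
    solution_alt spell dic
    = if ∃ w ∈ dic, ∀ s ∈ spell, s ∈ pvChars w then 1 else 2 := by
  unfold solution_alt
  rw [foldl_filter]
  have hQ : ∀ i, (hi : i < dic.length) →
      (((PySem.Set.ofList spell).all
        (fun c => decide (c ∈ PySem.Set.ofList (pvChars (List.getD dic i ""))))) = true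
        ↔ ∀ s ∈ spell, s ∈ pvChars (dic[i]'hi)) := by
    intro i hi
    rw [List.getD_eq_getElem dic "" hi]
    simp [List.all_eq_true, PySem.Set.mem_ofList]
  by_cases h : ∃ w ∈ dic, ∀ s ∈ spell, s ∈ pvChars w
  · rw [if_pos h]
    obtain ⟨w, hw, hall⟩ := h
    obtain ⟨i, hi, rfl⟩ := List.mem_iff_getElem.mp hw
    have hmem : i ∈ (List.range dic.length).filter
        (fun i => (PySem.Set.ofList spell).all
          (fun c => decide (c ∈ PySem.Set.ofList (pvChars (List.getD dic i ""))))) := by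
      rw [List.mem_filter]
      exact ⟨List.mem_range.mpr hi, (hQ i hi).mpr hall⟩
    rw [if_neg (by simpa [List.isEmpty_iff] using List.ne_nil_of_mem hmem)]
  · rw [if_neg h]
    have hnil : (List.range dic.length).filter
        (fun i => (PySem.Set.ofList spell).all
          (fun c => decide (c ∈ PySem.Set.ofList (pvChars (List.getD dic i ""))))) = [] := by
      rw [List.filter_eq_nil_iff]
      intro i hi
      rw [List.mem_range] at hi
      intro hQi
      exact h ⟨dic[i]'hi, List.getElem_mem hi, (hQ i hi).mp hQi⟩
    rw [if_pos (by rw [hnil]; rfl)]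

-- ===== VERDICT (by name: the statement is the Claim_ definition above) =====
theorem solution_spec : Claim_equal_solution := by
  intro spell dic _
  unfold Spec_solution solution
  rw [alt_eq, solGo_eq]
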